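-- pv_equiv track=rewrite | github.com/ngoduythinh250601/Codelearn | All/pairOfShoes/pairOfShoes.py | pairOfShoes
-- ===== SOURCE A (Python) =====
-- def pairOfShoes(shoes):
--     l, r = [], []
--     for p in shoes:
--         if p[0] == 0:
--             l.append(p[1])
--         else:
--             r.append(p[1])
--     l.sort()
--     r.sort()
--     return l == r
-- ===== SOURCE B (Python) =====
-- def pairOfShoes(shoes):
--     d = {}
--     for p in shoes:
--         d[p[1]] = d.get(p[1], 0) + (1 if p[0] == 0 else -1)
--     return all(v == 0 for v in d.values())
-- ===== Notes on version B (the rewrite author's own statement) =====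
-- stated objective: simpler
-- what changed: Replaces the two appended lists, two sorts and a list-equality test with one pass maintaining a single signed balance dict (+1 for left, -1 for right) followed by an all-zero check.
import Mathlib
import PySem

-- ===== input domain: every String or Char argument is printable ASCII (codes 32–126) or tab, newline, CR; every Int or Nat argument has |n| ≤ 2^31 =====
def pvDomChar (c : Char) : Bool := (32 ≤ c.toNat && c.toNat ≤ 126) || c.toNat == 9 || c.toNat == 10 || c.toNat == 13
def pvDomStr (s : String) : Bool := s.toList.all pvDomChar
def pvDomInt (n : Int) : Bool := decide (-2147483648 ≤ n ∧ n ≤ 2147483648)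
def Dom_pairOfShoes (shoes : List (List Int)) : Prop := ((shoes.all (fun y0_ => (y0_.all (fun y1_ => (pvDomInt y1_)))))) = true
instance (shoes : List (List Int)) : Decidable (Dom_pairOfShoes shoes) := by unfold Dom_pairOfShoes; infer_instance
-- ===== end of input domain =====

-- B maintains a single signed balance dict (+1 left / -1 right) and checks all zero,
-- instead of A's two appended lists, two sorts and a list-equality test.

-- ===== PORT A =====
-- loop appending p[1] into l or r depending on p[0] == 0 (pyGetD is exact under Pre_)
def pairOfShoes (shoes : List (List Int)) : Bool :=
  let lr := shoes.foldl
    (fun (lr : List Int × List Int) p =>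
      if PySem.List.pyGetD p 0 0 == 0 then (lr.1 ++ [PySem.List.pyGetD p 1 0], lr.2)
      else (lr.1, lr.2 ++ [PySem.List.pyGetD p 1 0]))
    ([], [])
  PySem.List.sorted lr.1 (fun x => x) false == PySem.List.sorted lr.2 (fun x => x) false

-- ===== PORT B =====
-- d[p[1]] = d.get(p[1], 0) + (1 if p[0] == 0 else -1); then all(v == 0 for v in d.values())
def pairOfShoes_alt (shoes : List (List Int)) : Bool :=
  let d := shoes.foldl
    (fun (d : PySem.Dict Int Int) p =>
      d.modify (PySem.List.pyGetD p 1 0) 0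
        (fun v => v + (if PySem.List.pyGetD p 0 0 == 0 then 1 else -1)))
    PySem.Dict.empty
  d.values.all (fun v => v == 0)

-- ===== PRECONDITION & SPEC =====
-- Pre_ excludes exactly the inputs where A raises IndexError (a shoe list with fewer
-- than two entries); B raises there too.
def Pre_pairOfShoes (shoes : List (List Int)) : Prop := ∀ p ∈ shoes, 2 ≤ p.length
instance (shoes : List (List Int)) : Decidable (Pre_pairOfShoes shoes) := by unfold Pre_pairOfShoes; infer_instance
def pvWitness_pairOfShoes : List (List Int) := [[0, 21], [1, 21], [0, 22], [1, 22]]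

def Spec_pairOfShoes (shoes : List (List Int)) (out : Bool) : Prop := out = pairOfShoes_alt shoes
instance (shoes : List (List Int)) (out : Bool) : Decidable (Spec_pairOfShoes shoes out) := by unfold Spec_pairOfShoes; infer_instance

-- ===== CLAIM (what is proved, stated in full; the proofs are below) =====
def Claim_equal_pairOfShoes : Prop := ∀ (shoes : List (List Int)), Dom_pairOfShoes shoes → Pre_pairOfShoes shoes → Spec_pairOfShoes shoes (pairOfShoes shoes)

-- ===== LEMMAS AND PROOFS =====

-- the two lists A accumulates, in closed form
def pvL (shoes : List (List Int)) : List Int :=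
  (shoes.filter (fun p => PySem.List.pyGetD p 0 0 == 0)).map (fun p => PySem.List.pyGetD p 1 0)
def pvR (shoes : List (List Int)) : List Int :=
  (shoes.filter (fun p => !(PySem.List.pyGetD p 0 0 == 0))).map (fun p => PySem.List.pyGetD p 1 0)

lemma pvA_fold (shoes : List (List Int)) (l r : List Int) :
    shoes.foldl
      (fun (lr : List Int × List Int) p =>
        if PySem.List.pyGetD p 0 0 == 0 then (lr.1 ++ [PySem.List.pyGetD p 1 0], lr.2)
        else (lr.1, lr.2 ++ [PySem.List.pyGetD p 1 0]))
      (l, r) = (l ++ pvL shoes, r ++ pvR shoes) := by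
  induction shoes generalizing l r with
  | nil => simp [pvL, pvR]
  | cons p t ih =>
    simp only [List.foldl_cons, pvL, pvR, List.filter_cons]
    by_cases h : (PySem.List.pyGetD p 0 0 == 0) = true
    · rw [if_pos h, ih]; simp [pvL, pvR, h]
    · rw [if_neg h, ih]; simp [pvL, pvR, h]

-- balance invariant of B's fold
lemma pvB_getD (shoes : List (List Int)) (d : PySem.Dict Int Int) (s : Int) :
    (shoes.foldl
      (fun (d : PySem.Dict Int Int) p =>
        d.modify (PySem.List.pyGetD p 1 0) 0
          (fun v => v + (if PySem.List.pyGetD p 0 0 == 0 then 1 else -1)))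
      d).getD s 0 = d.getD s 0 + ((pvL shoes).count s : Int) - ((pvR shoes).count s : Int) := by
  induction shoes generalizing d with
  | nil => simp [pvL, pvR]
  | cons p t ih =>
    simp only [List.foldl_cons]
    rw [ih, PySem.Dict.getD_modify]
    simp only [pvL, pvR, List.filter_cons]
    by_cases h : (PySem.List.pyGetD p 0 0 == 0) = true <;>
      by_cases hs : PySem.List.pyGetD p 1 0 = s
    all_goals (simp [h, hs]; omega)

theorem pairOfShoes_spec : Claim_equal_pairOfShoes := by
  intro shoes _ _
  unfold Spec_pairOfShoes pairOfShoes pairOfShoes_alt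
  rw [pvA_fold shoes [] []]
  simp only [List.nil_append]
  set F := (fun (d : PySem.Dict Int Int) (p : List Int) =>
      d.modify (PySem.List.pyGetD p 1 0) 0
        (fun v => v + (if PySem.List.pyGetD p 0 0 == 0 then 1 else -1))) with hF
  have hd : shoes.foldl F PySem.Dict.empty =
      shoes.foldl (fun d p => d.modify ((fun q => PySem.List.pyGetD q 1 0) p) 0
        ((fun (_ : PySem.Dict Int Int) p v => v + (if PySem.List.pyGetD p 0 0 == 0 then 1 else -1))
          (shoes.foldl F PySem.Dict.empty) p)) PySem.Dict.empty := rfl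
  have hnd : (shoes.foldl F PySem.Dict.empty).keys.Nodup := by
    rw [hd]; exact PySem.Dict.nodup_keys_foldl_modify_key _ _ _ _ _ PySem.Dict.nodup_keys_empty
  have hkeys : (shoes.foldl F PySem.Dict.empty).keys =
      PySem.Set.update (PySem.Dict.empty : PySem.Dict Int Int).keys
        (shoes.map (fun q => PySem.List.pyGetD q 1 0)) := by
    rw [hd]; exact PySem.Dict.keys_foldl_modify_key _ _ _ _ _
  -- rewrite values.all as a per-key condition
  rw [PySem.Dict.values_eq_map_keys _ hnd 0, List.all_map, Bool.eq_iff_iff]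
  simp only [beq_iff_eq, List.all_eq_true, Function.comp]
  have hval : ∀ s : Int, (shoes.foldl F PySem.Dict.empty).getD s 0 =
      ((pvL shoes).count s : Int) - ((pvR shoes).count s : Int) := by
    intro s; rw [pvB_getD]; simp
  have hmem : ∀ s : Int, s ∉ (shoes.foldl F PySem.Dict.empty).keys →
      (pvL shoes).count s = 0 ∧ (pvR shoes).count s = 0 := by
    intro s hs
    rw [hkeys] at hs
    rw [PySem.Set.mem_update, not_or] at hs
    have hs2 := hs.2
    simp only [List.mem_map, not_exists, not_and] at hs2
    constructor <;> rw [List.count_eq_zero] <;> intro hmem' <;>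
      [skip; skip] <;>
      · simp only [pvL, pvR, List.mem_map, List.mem_filter] at hmem'
        obtain ⟨p, ⟨hp, _⟩, hps⟩ := hmem'
        exact hs2 p hp hps
  constructor
  · intro hsort
    have hperm : (pvL shoes).Perm (pvR shoes) :=
      (PySem.List.sorted_id_eq_sorted_id_iff_perm _ _).1 hsort
    intro k _
    rw [hval k]
    have := hperm.count_eq k
    omega
  · intro hall
    apply (PySem.List.sorted_id_eq_sorted_id_iff_perm _ _).2
    rw [List.perm_iff_count]
    intro s
    by_cases hs : s ∈ (shoes.foldl F PySem.Dict.empty).keys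
    · have := hall s hs
      rw [hval s] at this
      omega
    · have := hmem s hs
      omega
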